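-- pv_equiv track=rewrite | github.com/AnjanaG/content-Agent | content_agent.py | cap_reddit_articles
-- ===== SOURCE A (Python) =====
-- def _is_reddit_url(url: str) -> bool:
--     if not url:
--         return False
--     u = url.lower()
--     return "reddit.com" in u or "redd.it" in u
--
-- def cap_reddit_articles(articles: list, max_reddit: int) -> list:
--     """Keep at most max_reddit items whose URL is Reddit; drop extra Reddit, keep order."""
--     out = []
--     n = 0
--     for a in articles:
--         if _is_reddit_url(a.get("url", "")):
--             if n < max_reddit:
--                 out.append(a)
--                 n += 1
--         else:
--             out.append(a)
--     return out
-- ===== SOURCE B (Python) =====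
-- def _is_reddit_url(url: str) -> bool:
--     if not url:
--         return False
--     u = url.lower()
--     return "reddit.com" in u or "redd.it" in u
--
-- def cap_reddit_articles(articles: list, max_reddit: int) -> list:
--     """Keep at most max_reddit items whose URL is Reddit; drop extra Reddit, keep order."""
--     flags = [_is_reddit_url(a.get("url", "")) for a in articles]
--     drop = max(flags.count(True) - max(0, max_reddit), 0)
--     kept_rev = []
--     for a, f in zip(reversed(articles), reversed(flags)):
--         if f and drop > 0:
--             drop -= 1
--         else:
--             kept_rev.append(a)
--     kept_rev.reverse()
--     return kept_rev
-- ===== Notes on version B (the rewrite author's own statement) =====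
-- stated objective: alternative
-- what changed: B precomputes all Reddit flags and the total Reddit count, derives how many Reddit items exceed the cap, and builds the result by a reversed traversal that drops exactly that many Reddit items from the tail, instead of A's forward scan with a running kept-counter.
import Mathlib
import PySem

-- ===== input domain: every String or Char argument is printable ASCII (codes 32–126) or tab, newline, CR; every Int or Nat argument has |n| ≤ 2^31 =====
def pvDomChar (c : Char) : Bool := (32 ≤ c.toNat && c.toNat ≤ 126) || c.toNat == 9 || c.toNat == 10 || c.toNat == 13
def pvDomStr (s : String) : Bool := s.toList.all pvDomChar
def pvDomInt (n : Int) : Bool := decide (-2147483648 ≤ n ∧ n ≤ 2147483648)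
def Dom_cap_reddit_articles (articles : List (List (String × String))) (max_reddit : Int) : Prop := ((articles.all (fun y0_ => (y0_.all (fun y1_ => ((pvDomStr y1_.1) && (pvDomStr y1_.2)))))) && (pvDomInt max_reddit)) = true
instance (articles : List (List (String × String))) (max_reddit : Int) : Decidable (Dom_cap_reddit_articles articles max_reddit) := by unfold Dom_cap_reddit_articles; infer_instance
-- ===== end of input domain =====

-- B differs from A in decomposition only: it precounts the Reddit items and drops the excess
-- ones by a reversed traversal; same return value, no side effects on the arguments.

-- shared helper (identical in Source A and Source B): _is_reddit_url
def pvIsReddit (url : String) : Bool :=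
  if url == "" then false
  else
    let u := PySem.Str.lower url
    PySem.Str.isIn "reddit.com" u || PySem.Str.isIn "redd.it" u

-- a.get("url", "")
def pvUrlOf (a : List (String × String)) : String :=
  (PySem.Dict.ofList a).getD "url" ""

-- ===== PORT A =====
def cap_reddit_articles (articles : List (List (String × String))) (max_reddit : Int) : List (List (String × String)) :=
  (articles.foldl
    (fun (s : List (List (String × String)) × Int) a =>
      if pvIsReddit (pvUrlOf a) then
        if s.2 < max_reddit then (s.1 ++ [a], s.2 + 1) else s
      else (s.1 ++ [a], s.2))
    ([], 0)).1

-- ===== PORT B =====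
def cap_reddit_articles_alt (articles : List (List (String × String))) (max_reddit : Int) : List (List (String × String)) :=
  let flags := articles.map (fun a => pvIsReddit (pvUrlOf a))
  let drop : Int := max ((flags.count true : Int) - max 0 max_reddit) 0
  let loop := (List.zip articles.reverse flags.reverse).foldl
    (fun (s : List (List (String × String)) × Int) af =>
      if af.2 && decide (0 < s.2) then (s.1, s.2 - 1) else (s.1 ++ [af.1], s.2))
    ([], drop)
  loop.1.reverse

-- ===== PRECONDITION & SPEC =====
def Spec_cap_reddit_articles (articles : List (List (String × String))) (max_reddit : Int) (out : List (List (String × String))) : Prop := out = cap_reddit_articles_alt articles max_reddit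
instance (articles : List (List (String × String))) (max_reddit : Int) (out : List (List (String × String))) : Decidable (Spec_cap_reddit_articles articles max_reddit out) := by unfold Spec_cap_reddit_articles; infer_instance

-- ===== CLAIM (what is proved, stated in full; the proofs are below) =====
def Claim_equal_cap_reddit_articles : Prop := ∀ (articles : List (List (String × String))) (max_reddit : Int), Dom_cap_reddit_articles articles max_reddit → Spec_cap_reddit_articles articles max_reddit (cap_reddit_articles articles max_reddit)

-- ===== LEMMAS AND PROOFS =====

def specCap {α : Type} (p : α → Bool) : List α → Int → List α
  | [], _ => []
  | a :: t, m =>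
      if p a then (if 0 < m then a :: specCap p t (m - 1) else specCap p t m)
      else a :: specCap p t m

def jf {α : Type} (p : α → Bool) (d : Int) : List α → List α × Int
  | [] => ([], d)
  | a :: t =>
      let s := jf p d t
      if p a && decide (0 < s.2) then (s.1, s.2 - 1) else (s.1 ++ [a], s.2)

theorem specCap_nonpos {α : Type} (p : α → Bool) (xs : List α) (m : Int) (hm : m ≤ 0) :
    specCap p xs m = xs.filter (fun x => !p x) := by
  induction xs generalizing m with
  | nil => simp [specCap]
  | cons a t ih =>
    simp only [specCap, List.filter_cons]
    by_cases h : p a = true <;> simp [h, ih m hm, show ¬ (0 < m) by omega]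

theorem specCap_ge {α : Type} (p : α → Bool) (xs : List α) (m : Int)
    (hm : (xs.countP p : Int) ≤ m) : specCap p xs m = xs := by
  induction xs generalizing m with
  | nil => simp [specCap]
  | cons a t ih =>
    simp only [List.countP_cons] at hm
    simp only [specCap]
    by_cases h : p a = true
    · simp only [h, if_true]
      rw [if_pos (by simp [h] at hm; push_cast at hm ⊢; omega),
          ih (m - 1) (by simp [h] at hm; push_cast at hm ⊢; omega)]
    · simp only [h, if_false, Bool.false_eq_true]
      rw [ih m (by simp [h] at hm; push_cast at hm ⊢; omega)]

theorem specCap_max {α : Type} (p : α → Bool) (xs : List α) (m : Int) :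
    specCap p xs m = specCap p xs (max 0 m) := by
  by_cases h : 0 ≤ m
  · rw [max_eq_right h]
  · rw [max_eq_left (by omega), specCap_nonpos p xs m (by omega),
        specCap_nonpos p xs 0 le_rfl]

theorem jf_ge {α : Type} (p : α → Bool) (xs : List α) (d : Int)
    (hd : (xs.countP p : Int) ≤ d) :
    jf p d xs = ((xs.filter (fun x => !p x)).reverse, d - xs.countP p) := by
  induction xs with
  | nil => simp [jf]
  | cons a t ih =>
    simp only [List.countP_cons] at hd
    by_cases h : p a = true
    · simp only [h, if_pos] at hd
      have ht : (t.countP p : Int) ≤ d := by push_cast at hd ⊢; omega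
      have hpos : (0:Int) < d - t.countP p := by push_cast at hd ⊢; omega
      simp only [jf, ih ht, h, hpos, decide_true, Bool.true_and, if_true,
        List.filter_cons, Bool.not_true, Bool.false_eq_true, if_false]
      refine Prod.ext rfl ?_
      simp only [List.countP_cons, h, if_pos]
      push_cast
      omega
    · simp only [h, if_neg] at hd
      have ht : (t.countP p : Int) ≤ d := by simp [h] at hd; omega
      simp only [jf, ih ht, h, Bool.false_and, Bool.false_eq_true, if_false,
        List.filter_cons, Bool.not_false, if_true, List.reverse_append]
      simp [h]

theorem jf_le {α : Type} (p : α → Bool) (xs : List α) (d : Int)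
    (h0 : 0 ≤ d) (hd : d ≤ (xs.countP p : Int)) :
    (jf p d xs).1.reverse = specCap p xs ((xs.countP p : Int) - d) ∧ (jf p d xs).2 = 0 := by
  induction xs generalizing d with
  | nil =>
    simp only [List.countP_nil, Nat.cast_zero] at hd
    simp [jf, specCap, le_antisymm hd h0]
  | cons a t ih =>
    by_cases h : p a = true
    · have hcnt : ((a :: t).countP p : Int) = (t.countP p : Int) + 1 := by
        simp [List.countP_cons, h]
      rw [hcnt] at hd ⊢
      by_cases hle : d ≤ (t.countP p : Int)
      · obtain ⟨ih1, ih2⟩ := ih d h0 hle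
        have hpos : 0 < (t.countP p : Int) + 1 - d := by omega
        simp only [jf, ih2, h, decide_eq_true_eq, Bool.true_and]
        rw [if_neg (by simp)]
        refine ⟨?_, rfl⟩
        rw [List.reverse_append, List.reverse_singleton, List.singleton_append, ih1]
        simp only [specCap, h, if_true, hpos, if_true]
        congr 2
        ring
      · have hde : d = (t.countP p : Int) + 1 := by omega
        have hjf := jf_ge p t d (by omega)
        have hpos : (0 : Int) < d - t.countP p := by omega
        simp only [jf, hjf, h, hpos, decide_true, Bool.true_and, if_true]
        refine ⟨?_, by omega⟩
        have hz : (t.countP p : Int) + 1 - d = 0 := by omega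
        rw [hz]
        simp only [specCap, h, if_true]
        rw [if_neg (by omega), List.reverse_reverse, specCap_nonpos p t 0 le_rfl]
    · have hcnt : ((a :: t).countP p : Int) = (t.countP p : Int) := by
        simp [List.countP_cons, h]
      rw [hcnt] at hd ⊢
      obtain ⟨ih1, ih2⟩ := ih d h0 hd
      simp only [jf, h, Bool.false_and]
      rw [if_neg (by simp)]
      refine ⟨?_, ih2⟩
      rw [List.reverse_append, List.reverse_singleton, List.singleton_append, ih1]
      simp [specCap, h]

-- A's foldl computes specCap with budget m - n
theorem foldA_eq {α : Type} (p : α → Bool) (m : Int) (xs : List α) :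
    ∀ (out : List α) (n : Int),
    (xs.foldl (fun (s : List α × Int) a =>
        if p a then (if s.2 < m then (s.1 ++ [a], s.2 + 1) else s)
        else (s.1 ++ [a], s.2)) (out, n)).1 = out ++ specCap p xs (m - n) := by
  induction xs with
  | nil => intro out n; simp [specCap]
  | cons a t ih =>
    intro out n
    simp only [List.foldl_cons, specCap]
    by_cases h : p a = true
    · by_cases hn : n < m
      · rw [if_pos h, ih, if_pos h, if_pos hn, if_pos (by omega)]
        have hmn : m - (n + 1) = m - n - 1 := by ring
        simp [hmn]
      · rw [if_pos h, ih, if_pos h, if_neg hn, if_neg (by omega)]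
    · rw [if_neg h, ih, if_neg h]
      simp

-- B's foldl over the zipped reversed lists is jf
theorem foldB_eq {α : Type} (p : α → Bool) (xs : List α) (d : Int) :
    ((List.zip xs.reverse (xs.map p).reverse).foldl
      (fun (s : List α × Int) af =>
        if af.2 && decide (0 < s.2) then (s.1, s.2 - 1) else (s.1 ++ [af.1], s.2))
      ([], d)) = jf p d xs := by
  induction xs with
  | nil => simp [jf]
  | cons a t ih =>
    have hz : List.zip (a :: t).reverse ((a :: t).map p).reverse
        = List.zip t.reverse (t.map p).reverse ++ [(a, p a)] := by
      simp only [List.reverse_cons, List.map_cons]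
      rw [List.zip_append (by simp)]
      simp
    rw [hz, List.foldl_append, ih]
    simp [jf]

theorem count_true_map {α : Type} (p : α → Bool) (xs : List α) :
    (xs.map p).count true = xs.countP p := by
  induction xs with
  | nil => rfl
  | cons a t ih =>
    rcases h : p a with _ | _ <;> simp [h, ih, List.countP_cons]

-- ===== VERDICT (by name: the statement is the Claim_ definition above) =====
theorem cap_reddit_articles_spec : Claim_equal_cap_reddit_articles := by
  intro articles m _
  unfold Spec_cap_reddit_articles cap_reddit_articles cap_reddit_articles_alt
  set p : List (String × String) → Bool := fun a => pvIsReddit (pvUrlOf a) with hp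
  rw [foldA_eq p m articles [] 0]
  simp only [foldB_eq p articles, count_true_map, List.nil_append, sub_zero]
  set r : Int := (articles.countP p : Int) with hr
  have hr0 : 0 ≤ r := by positivity
  set k : Int := max 0 m with hk
  have hk0 : 0 ≤ k := le_max_left _ _
  by_cases hle : r ≤ k
  · rw [show max (r - k) 0 = 0 by omega]
    obtain ⟨h1, _⟩ := jf_le p articles 0 le_rfl (by omega)
    rw [h1, sub_zero, ← hr]
    by_cases hm : 0 ≤ m
    · rw [specCap_ge p articles r le_rfl, specCap_ge p articles m (by omega)]
    · rw [specCap_nonpos p articles m (by omega),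
          show r = (0:Int) by omega, specCap_nonpos p articles 0 le_rfl]
  · rw [show max (r - k) 0 = r - k by omega]
    obtain ⟨h1, _⟩ := jf_le p articles (r - k) (by omega) (by omega)
    rw [h1, ← hr, show r - (r - k) = k by ring, ← specCap_max]
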